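-- pv_equiv track=rewrite | github.com/LeducSama/intelligent-document-assistant | llm_rag_system.py | _extract_troubleshooting_info
-- ===== SOURCE A (Python) =====
-- def _extract_troubleshooting_info(content: str) -> str:
--     """Extract troubleshooting information"""
--     lines = content.split('\n')
--     trouble_section = []
--     in_trouble_section = False
--
--     for line in lines:
--         if any(word in line.lower() for word in ['troubleshoot', 'issues', 'problems', 'cannot', 'won\'t']):
--             in_trouble_section = True
--         elif line.strip() and line.startswith('#') and in_trouble_section:
--             if not any(word in line.lower() for word in ['troubleshoot', 'issues', 'problems']):
--                 break
--
--         if in_trouble_section: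
--             trouble_section.append(line)
--
--     if trouble_section:
--         return "Here are troubleshooting steps:\n\n" + '\n'.join(trouble_section[:15])
--     else:
--         return "For troubleshooting: Check your master password, verify file permissions, and ensure .NET Framework is installed."
-- ===== SOURCE B (Python) =====
-- def _extract_troubleshooting_info(content: str) -> str:
--     """Extract troubleshooting information (index-arithmetic version: precompute
--     per-line keyword flags and the positions of break lines, then slice)."""
--     KW = ('troubleshoot', 'issues', 'problems', 'cannot', "won't")
--     lines = content.split('\n')
--     kw = [any(w in l.lower() for w in KW) for l in lines]
--     if True not in kw:
--         return "For troubleshooting: Check your master password, verify file permissions, and ensure .NET Framework is installed."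
--     start = kw.index(True)
--     breaks = [i for i, l in enumerate(lines)
--               if l.startswith('#') and l.strip() and not any(w in l.lower() for w in KW)]
--     stop = next((i for i in breaks if i > start), len(lines))
--     return "Here are troubleshooting steps:\n\n" + '\n'.join(lines[start:stop][:15])
-- ===== Notes on version B (the rewrite author's own statement) =====
-- stated objective: alternative
-- what changed: A's single stateful scan (in-section flag, accumulator, break) is replaced by index arithmetic over precomputed whole lists: a keyword-flag list gives the start index via kw.index(True), a comprehension collects all break-header positions, the stop index is the first break position past start (A's dead inner 3-keyword re-check disappears), and the result is a plain slice lines[start:stop][:15].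
import Mathlib
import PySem

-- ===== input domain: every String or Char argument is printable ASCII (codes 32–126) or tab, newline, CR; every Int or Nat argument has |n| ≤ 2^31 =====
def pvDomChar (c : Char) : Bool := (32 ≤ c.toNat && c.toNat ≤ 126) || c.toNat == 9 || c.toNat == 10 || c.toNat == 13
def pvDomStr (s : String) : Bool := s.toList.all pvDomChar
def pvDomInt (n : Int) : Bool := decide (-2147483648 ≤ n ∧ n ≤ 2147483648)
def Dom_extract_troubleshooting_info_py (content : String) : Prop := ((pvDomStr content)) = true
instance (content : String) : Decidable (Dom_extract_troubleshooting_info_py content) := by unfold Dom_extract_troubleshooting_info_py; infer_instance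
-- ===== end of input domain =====

-- B replaces A's single stateful scan (flag + accumulator + break) by index arithmetic over
-- precomputed lists: keyword flags give the start index, a list of break-header positions gives
-- the stop index, and the section is a plain slice; objective: alternative, same cost.

-- ===== PORT A =====
-- any(word in line.lower() for word in ['troubleshoot','issues','problems','cannot',"won't"])
-- (the same test occurs verbatim in both Pythons)
def pvHasKw (line : String) : Bool :=
  PySem.Str.isIn "troubleshoot" (PySem.Str.lower line) ||
  PySem.Str.isIn "issues" (PySem.Str.lower line) ||
  PySem.Str.isIn "problems" (PySem.Str.lower line) ||
  PySem.Str.isIn "cannot" (PySem.Str.lower line) ||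
  PySem.Str.isIn "won't" (PySem.Str.lower line)

-- any(word in line.lower() for word in ['troubleshoot','issues','problems'])  (A's inner check)
def pvHasKw3 (line : String) : Bool :=
  PySem.Str.isIn "troubleshoot" (PySem.Str.lower line) ||
  PySem.Str.isIn "issues" (PySem.Str.lower line) ||
  PySem.Str.isIn "problems" (PySem.Str.lower line)

-- A's for-loop: state (in_trouble_section, trouble_section); `break` returns the accumulator
def pvLoopA : List String → Bool → List String → List String
  | [], _, acc => acc
  | line :: rest, inSec, acc =>
      if pvHasKw line then
        -- in_trouble_section = True; then the trailing `if in_trouble_section: append`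
        pvLoopA rest true (acc ++ [line])
      else if !(PySem.Str.strip line).toList.isEmpty && PySem.Str.startswith line "#" && inSec then
        if !(pvHasKw3 line) then acc  -- break
        else if inSec then pvLoopA rest inSec (acc ++ [line]) else pvLoopA rest inSec acc
      else
        if inSec then pvLoopA rest inSec (acc ++ [line]) else pvLoopA rest inSec acc

def extract_troubleshooting_info_py (content : String) : String :=
  let lines := (PySem.Str.split? content "\n").getD []  -- sep = "\n" ≠ "", so split? is never none
  let trouble := pvLoopA lines false []
  if !trouble.isEmpty then
    "Here are troubleshooting steps:\n\n" ++
      PySem.Str.join "\n" (PySem.List.slice trouble none (some 15))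
  else
    "For troubleshooting: Check your master password, verify file permissions, and ensure .NET Framework is installed."

-- ===== PORT B =====
-- the comprehension's test: l.startswith('#') and l.strip() and not any(w in l.lower() for w in KW)
def pvIsBreak (line : String) : Bool :=
  PySem.Str.startswith line "#" && !(PySem.Str.strip line).toList.isEmpty && !pvHasKw line

def extract_troubleshooting_info_py_alt (content : String) : String :=
  let lines := (PySem.Str.split? content "\n").getD []  -- sep = "\n" ≠ "", so split? is never none
  let kw := lines.map pvHasKw                            -- kw = [any(...) for l in lines]
  match PySem.List.index? kw true with                   -- 'True not in kw' / kw.index(True)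
  | none =>
      "For troubleshooting: Check your master password, verify file permissions, and ensure .NET Framework is installed."
  | some start =>
      -- breaks = [i for i, l in enumerate(lines) if ...]
      let breaks := ((PySem.List.enumerate lines 0).filter (fun p => pvIsBreak p.2)).map (·.1)
      -- stop = next((i for i in breaks if i > start), len(lines))
      let stop := ((breaks.filter (fun i => (start : Int) < i)).head?).getD (lines.length : Int)
      "Here are troubleshooting steps:\n\n" ++
        PySem.Str.join "\n"
          (PySem.List.slice (PySem.List.slice lines (some (start : Int)) (some stop)) none (some 15))

-- ===== PRECONDITION & SPEC =====
def Spec_extract_troubleshooting_info_py (content : String) (out : String) : Prop := out = extract_troubleshooting_info_py_alt content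
instance (content : String) (out : String) : Decidable (Spec_extract_troubleshooting_info_py content out) := by unfold Spec_extract_troubleshooting_info_py; infer_instance

-- ===== CLAIM =====
def Claim_equal_extract_troubleshooting_info_py : Prop := ∀ (content : String), Dom_extract_troubleshooting_info_py content → Spec_extract_troubleshooting_info_py content (extract_troubleshooting_info_py content)

-- ===== LEMMAS AND PROOFS =====

-- the 'stop' pipeline of B, abstracted over the enumeration start c and threshold k
def pvG (ls : List String) (c k : Int) : Option Int :=
  ((((PySem.List.enumerate ls c).filter (fun p => pvIsBreak p.2)).map (·.1)).filter
    (fun i => k < i)).head?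

-- A's inner keyword list is a subset of the outer one
theorem pvHasKw3_eq_false {l : String} (h : pvHasKw l = false) : pvHasKw3 l = false := by
  unfold pvHasKw at h
  unfold pvHasKw3
  simp only [Bool.or_eq_false_iff] at h ⊢
  exact ⟨⟨h.1.1.1.1, h.1.1.1.2⟩, h.1.1.2⟩

-- the 'keep' rule of A's loop once in the section, as a predicate
def pvKeep (line : String) : Bool :=
  pvHasKw line || !(!(PySem.Str.strip line).toList.isEmpty && PySem.Str.startswith line "#")

theorem pvKeep_eq_not_isBreak (l : String) : pvKeep l = !pvIsBreak l := by
  unfold pvKeep pvIsBreak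
  cases h1 : pvHasKw l <;> cases h2 : (PySem.Str.strip l).toList.isEmpty <;>
    cases h3 : PySem.Str.startswith l "#" <;> simp_all

-- once in the section, A's loop appends exactly the takeWhile-pvKeep prefix
theorem pvLoopA_true (ls : List String) : ∀ acc, pvLoopA ls true acc = acc ++ ls.takeWhile pvKeep := by
  induction ls with
  | nil => intro acc; simp [pvLoopA]
  | cons l rest ih =>
    intro acc
    by_cases hk : pvHasKw l = true
    · simp [pvLoopA, hk, pvKeep, ih]
    · simp only [Bool.not_eq_true] at hk
      by_cases hh : (!(PySem.Str.strip l).toList.isEmpty && PySem.Str.startswith l "#") = true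
      · rw [Bool.and_eq_true] at hh
        have h1 : ¬ PySem.Chars.strip l.toList = [] := by simpa using hh.1
        have h2 : PySem.Chars.startswith l.toList ['#'] = true := by simpa using hh.2
        have hkeepf : pvKeep l = false := by simp [pvKeep, hk, h1, h2]
        simp [pvLoopA, hk, h1, h2, pvHasKw3_eq_false hk, hkeepf]
      · have hh' : (!(PySem.Str.strip l).toList.isEmpty && PySem.Str.startswith l "#") = false :=
          Bool.eq_false_iff.mpr hh
        rw [Bool.and_eq_false_iff] at hh'
        rcases hh' with h | h
        · have h1 : PySem.Chars.strip l.toList = [] := by simpa using h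
          have hkeept : pvKeep l = true := by simp [pvKeep, h1]
          simp [pvLoopA, hk, h1, hkeept, ih]
        · have h2 : PySem.Chars.startswith l.toList ['#'] = false := by simpa using h
          have hkeept : pvKeep l = true := by simp [pvKeep, h2]
          simp [pvLoopA, hk, h2, hkeept, ih]

-- before the section, A's loop is a search for the first keyword line
theorem pvLoopA_false (ls : List String) :
    pvLoopA ls false [] =
      match ls.dropWhile (fun l => !pvHasKw l) with
      | [] => []
      | first :: rest => first :: rest.takeWhile pvKeep := by
  induction ls with
  | nil => simp [pvLoopA]
  | cons l rest ih =>
    by_cases hk : pvHasKw l = true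
    · simp [pvLoopA, hk, pvLoopA_true]
    · simp only [Bool.not_eq_true] at hk
      simp [pvLoopA, hk, ih]

-- takeWhile of the negation is take up to the first hit
theorem takeWhile_not_eq_take_findIdx {α : Type} (p : α → Bool) (ls : List α) :
    ls.takeWhile (fun x => !p x) = ls.take (ls.findIdx p) := by
  induction ls with
  | nil => simp
  | cons a l ih =>
    cases h : p a <;> simp [List.findIdx_cons, h, ih]

-- below the threshold, the stop pipeline finds the first break line
theorem pvG_getD (ls : List String) : ∀ (c k : Int), k < c →
    (pvG ls c k).getD (c + ls.length) = c + ls.findIdx pvIsBreak := by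
  induction ls with
  | nil => intro c k _; simp [pvG, PySem.List.enumerate_nil]
  | cons l rest ih =>
    intro c k hkc
    rw [pvG, PySem.List.enumerate_cons]
    cases hb : pvIsBreak l
    · have := ih (c + 1) k (by omega)
      rw [pvG] at this
      simp only [List.filter_cons, hb, List.findIdx_cons,
        Bool.false_eq_true, if_false, cond_false, List.length_cons]
      rw [show ((c : Int) + ((rest.findIdx pvIsBreak : Nat) + 1 : Nat)) = (c + 1) + (rest.findIdx pvIsBreak : Nat) by push_cast; ring]
      rw [show ((c : Int) + ((rest.length : Nat) + 1 : Nat)) = (c + 1) + (rest.length : Nat) by push_cast; ring]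
      exact this
    · simp [hb, List.findIdx_cons, hkc]

-- shifting the enumeration and the threshold by one shifts the stop pipeline's value
theorem pvG_shift (ls : List String) : ∀ (c k : Int),
    pvG ls (c + 1) (k + 1) = (pvG ls c k).map (· + 1) := by
  induction ls with
  | nil => intro c k; simp [pvG, PySem.List.enumerate_nil]
  | cons l rest ih =>
    intro c k
    rw [pvG, pvG, PySem.List.enumerate_cons, PySem.List.enumerate_cons]
    cases hb : pvIsBreak l
    · simp only [List.filter_cons, hb, Bool.false_eq_true, if_false]
      have := ih (c + 1) k
      rw [pvG, pvG] at this
      exact this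
    · by_cases hkc : k < c
      · have h1 : k + 1 < c + 1 := by omega
        simp [hb, hkc, h1]
      · have h1 : ¬ (k + 1 < c + 1) := by omega
        have := ih (c + 1) k
        rw [pvG, pvG] at this
        simpa [List.filter_cons, hb, hkc, h1] using this

-- a value produced by the stop pipeline lies above its threshold
theorem pvG_some_gt {ls : List String} {c k v : Int} (h : pvG ls c k = some v) : k < v := by
  unfold pvG at h
  rcases List.head?_eq_some_iff.mp h with ⟨t, ht⟩
  have hv : v ∈ (((PySem.List.enumerate ls c).filter (fun p => pvIsBreak p.2)).map (·.1)).filter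
      (fun i => k < i) := by rw [ht]; exact List.mem_cons_self
  simpa using List.of_mem_filter hv

-- the list-level heart of the equivalence: B's index/slice computation equals A's scan result
theorem pvG_peel (l : String) (rest : List String) (k : Int) (hk0 : ¬ k < 0) :
    pvG (l :: rest) 0 k = pvG rest 1 k := by
  rw [pvG, pvG, PySem.List.enumerate_cons]
  cases hb : pvIsBreak l <;> simp [hb, hk0]

theorem pvMain (ls : List String) :
    (match PySem.List.index? (ls.map pvHasKw) true with
     | none => none
     | some start =>
         some (PySem.List.slice ls (some ((start : Nat) : Int))
                (some ((pvG ls 0 ((start : Nat) : Int)).getD (ls.length : Int))))) =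
    (match ls.dropWhile (fun l => !pvHasKw l) with
     | [] => (none : Option (List String))
     | first :: rest => some (first :: rest.takeWhile pvKeep)) := by
  have hkeepf : pvKeep = fun x => !pvIsBreak x := funext pvKeep_eq_not_isBreak
  induction ls with
  | nil => simp [PySem.List.index?_eq_idxOf?]
  | cons l rest ih =>
    by_cases hk : pvHasKw l = true
    · rw [List.map_cons, hk, PySem.List.index?_cons_self]
      have hd : List.dropWhile (fun l => !pvHasKw l) (l :: rest) = l :: rest := by
        simp [hk]
      rw [hd]
      dsimp only
      have hg : pvG (l :: rest) 0 ((0 : Nat) : Int) = pvG rest 1 0 := by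
        rw [pvG, pvG, PySem.List.enumerate_cons]
        have h0 : ¬ ((0 : Int) < 0) := by omega
        cases hb : pvIsBreak l <;> simp [hb]
      have hstop : (pvG (l :: rest) 0 ((0 : Nat) : Int)).getD (((l :: rest).length : Nat) : Int)
          = ((rest.findIdx pvIsBreak + 1 : Nat) : Int) := by
        rw [hg, show (((l :: rest).length : Nat) : Int) = 1 + (rest.length : Int) by
              simp [List.length_cons]; ring,
           pvG_getD rest 1 0 (by omega)]
        push_cast
        ring
      rw [hstop, Nat.cast_zero, PySem.List.slice_zero_start,
        PySem.List.slice_to_natCast, hkeepf, takeWhile_not_eq_take_findIdx,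
        List.take_succ_cons]
    · simp only [Bool.not_eq_true] at hk
      rw [List.map_cons, hk,
        PySem.List.index?_cons_of_ne (rest.map pvHasKw) (by simp : (false : Bool) ≠ true)]
      have hd : List.dropWhile (fun l => !pvHasKw l) (l :: rest)
          = List.dropWhile (fun l => !pvHasKw l) rest := by
        simp [hk]
      rw [hd]
      cases hidx : PySem.List.index? (rest.map pvHasKw) true with
      | none =>
        rw [hidx] at ih
        dsimp only [Option.map_none]
        dsimp only at ih
        cases hD : rest.dropWhile (fun l => !pvHasKw l) with
        | nil => rfl
        | cons f r => rw [hD] at ih; exact absurd ih (by simp)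
      | some s =>
        rw [hidx] at ih
        dsimp only [Option.map_some]
        dsimp only at ih
        -- peel the head off the stop pipeline, then shift the threshold and enumeration by one
        have hcast : (((s + 1 : Nat)) : Int) = (s : Int) + 1 := by push_cast; ring
        have hpeel : pvG (l :: rest) 0 (((s + 1 : Nat)) : Int) = pvG rest 1 ((s : Int) + 1) := by
          rw [pvG_peel l rest _ (by push_cast; omega), hcast]
        have hshift : pvG rest 1 ((s : Int) + 1) = (pvG rest 0 ((s : Nat) : Int)).map (· + 1) := by
          have := pvG_shift rest 0 (s : Int)
          simpa using this
        set t : Int := (pvG rest 0 ((s : Nat) : Int)).getD ((rest.length : Nat) : Int) with ht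
        have hstop : (pvG (l :: rest) 0 (((s + 1 : Nat)) : Int)).getD (((l :: rest).length : Nat) : Int)
            = 1 + t := by
          rw [hpeel, hshift, ht]
          cases hgv : pvG rest 0 ((s : Nat) : Int) with
          | none => simp [List.length_cons]; ring
          | some v => simp only [Option.map_some, Option.getD_some]; ring
        have htnn : 0 ≤ t := by
          rw [ht]
          cases hgv : pvG rest 0 ((s : Nat) : Int) with
          | none => simp
          | some v =>
            have := pvG_some_gt hgv
            simp only [Option.getD_some]
            omega
        have hslice : PySem.List.slice (l :: rest) (some (((s + 1 : Nat)) : Int)) (some (1 + t))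
            = PySem.List.slice rest (some ((s : Nat) : Int)) (some t) := by
          rw [PySem.List.slice_toNat _ (by push_cast; omega) (by omega),
              PySem.List.slice_toNat _ (by omega) htnn]
          have h1 : ((s + 1 : Nat) : Int).toNat = s + 1 := by push_cast; omega
          have h2 : ((s : Nat) : Int).toNat = s := by omega
          have h3 : (1 + t).toNat = 1 + t.toNat := by omega
          rw [h1, h2, h3, List.drop_succ_cons]
          congr 1
          omega
        rw [hstop, hslice]
        exact ih

-- ===== VERDICT =====
theorem extract_troubleshooting_info_py_spec : Claim_equal_extract_troubleshooting_info_py := by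
  intro content _
  unfold Spec_extract_troubleshooting_info_py extract_troubleshooting_info_py
    extract_troubleshooting_info_py_alt
  dsimp only
  rw [pvLoopA_false]
  have hmain := pvMain ((PySem.Str.split? content "\n").getD [])
  cases hI : PySem.List.index? (((PySem.Str.split? content "\n").getD []).map pvHasKw) true with
  | none =>
    rw [hI] at hmain
    dsimp only at hmain
    cases hD : ((PySem.Str.split? content "\n").getD []).dropWhile (fun l => !pvHasKw l) with
    | nil => simp
    | cons f r => rw [hD] at hmain; exact absurd hmain (by simp)
  | some s =>
    rw [hI] at hmain
    dsimp only at hmain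
    cases hD : ((PySem.Str.split? content "\n").getD []).dropWhile (fun l => !pvHasKw l) with
    | nil => rw [hD] at hmain; exact absurd hmain (by simp)
    | cons f r =>
      rw [hD] at hmain
      dsimp only at hmain
      simp only [Option.some.injEq] at hmain
      rw [pvG] at hmain
      dsimp only
      rw [hmain]
      simp
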